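-- pv_equiv track=rewrite | github.com/andy2167565/leetcode | Medium/1737_change-minimum-characters-to-satisfy-one-of-three-conditions/change-minimum-characters-to-satisfy-one-of-three-conditions.py | minCharacters
-- ===== SOURCE A (Python) =====
-- def minCharacters(a: str, b: str) -> int:
--     # Reference: https://leetcode.com/problems/change-minimum-characters-to-satisfy-one-of-three-conditions/solutions/1032070/java-c-python-clean-solution/
--     import collections
--     m, n = len(a), len(b)
--     counter1 = collections.Counter(ord(c) - 97 for c in a)
--     counter2 = collections.Counter(ord(c) - 97 for c in b)
--     ans = m + n - max((counter1 + counter2).values())  # Condition 3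
--     for i in range(25):
--         counter1[i + 1] += counter1[i]
--         counter2[i + 1] += counter2[i]
--         ans = min(ans, m - counter1[i] + counter2[i])  # Condition 1
--         ans = min(ans, n - counter2[i] + counter1[i])  # Condition 2
--     return ans
-- ===== SOURCE B (Python) =====
-- def minCharacters(a: str, b: str) -> int:
--     import collections
--     # condition 3: make everything one letter
--     freq = collections.Counter(a) + collections.Counter(b)
--     best = len(a) + len(b) - max(freq.values())
--     # conditions 1 and 2: for each split threshold i, recount directly from the strings
--     for i in range(25):
--         la = sum(1 for c in a if 0 <= ord(c) - 97 <= i)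
--         lb = sum(1 for c in b if 0 <= ord(c) - 97 <= i)
--         best = min(best, len(a) - la + lb, len(b) - lb + la)
--     return best
-- ===== Notes on version B (the rewrite author's own statement) =====
-- stated objective: alternative
-- what changed: B drops A's in-place prefix-sum accumulation inside the Counter dicts and instead recomputes, for each of the 25 split thresholds, the below-threshold counts directly from the raw strings; condition 3 uses one combined Counter of the characters themselves instead of letter indices.
import Mathlib
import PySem

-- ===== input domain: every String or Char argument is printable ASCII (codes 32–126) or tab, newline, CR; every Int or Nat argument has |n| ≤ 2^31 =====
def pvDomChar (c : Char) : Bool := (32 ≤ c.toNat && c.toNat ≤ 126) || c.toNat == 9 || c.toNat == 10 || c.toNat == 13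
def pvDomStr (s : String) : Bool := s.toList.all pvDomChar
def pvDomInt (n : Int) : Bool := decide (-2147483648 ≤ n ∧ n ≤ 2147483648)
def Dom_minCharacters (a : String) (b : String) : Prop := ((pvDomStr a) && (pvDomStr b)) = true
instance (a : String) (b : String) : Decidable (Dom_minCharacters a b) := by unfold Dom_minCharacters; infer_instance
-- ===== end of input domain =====

-- B replaces A's in-place prefix-sum accumulation inside the Counter dicts by recomputing the
-- below-threshold counts directly from the raw strings at each of the 25 thresholds (alternative
-- decomposition, same exact result).

-- ===== PORT A =====
-- ord(c) - 97
def pvIdx (c : Char) : Int := (c.toNat : Int) - 97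

-- literal port of collections.Counter.__add__: iterate self's items, then other's keys not in
-- self; keep only positive counts
def pvCounterAdd {κ : Type} [BEq κ] (d1 d2 : PySem.Dict κ Int) : PySem.Dict κ Int :=
  let r := d1.items.foldl
    (fun r p => if 0 < p.2 + d2.getD p.1 0 then r.insert p.1 (p.2 + d2.getD p.1 0) else r)
    PySem.Dict.empty
  d2.items.foldl
    (fun r p => if d1.contains p.1 = false ∧ 0 < p.2 then r.insert p.1 p.2 else r) r

-- body of A's 'for i in range(25)' loop (state: ans, counter1, counter2)
def pvStepA (m n : Int) (st : Int × PySem.Dict Int Int × PySem.Dict Int Int) (i : Int) :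
    Int × PySem.Dict Int Int × PySem.Dict Int Int :=
  let c1 := st.2.1.insert (i + 1) (st.2.1.getD (i + 1) 0 + st.2.1.getD i 0)
  let c2 := st.2.2.insert (i + 1) (st.2.2.getD (i + 1) 0 + st.2.2.getD i 0)
  (min (min st.1 (m - c1.getD i 0 + c2.getD i 0)) (n - c2.getD i 0 + c1.getD i 0), c1, c2)

def minCharacters (a : String) (b : String) : Int :=
  let m : Int := PySem.Str.len a
  let n : Int := PySem.Str.len b
  let c1 := PySem.Dict.counter (a.toList.map pvIdx)
  let c2 := PySem.Dict.counter (b.toList.map pvIdx)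
  -- max() of an empty sequence raises ValueError in Python (only when a = b = ""): excluded by Pre_
  let ans : Int :=
    match PySem.List.max? (pvCounterAdd c1 c2).values id with
    | some v => m + n - v
    | none => 0
  ((PySem.List.pyRange 0 25 1).foldl (pvStepA m n) (ans, c1, c2)).1

-- ===== PORT B =====
-- body of B's 'for i in range(25)' loop: recount both strings against threshold i
def pvStepB (a b : String) (best : Int) (i : Int) : Int :=
  let la : Int := a.toList.foldl (fun s c => if 0 ≤ pvIdx c ∧ pvIdx c ≤ i then s + 1 else s) 0
  let lb : Int := b.toList.foldl (fun s c => if 0 ≤ pvIdx c ∧ pvIdx c ≤ i then s + 1 else s) 0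
  min (min best (PySem.Str.len a - la + lb)) (PySem.Str.len b - lb + la)

def minCharacters_alt (a : String) (b : String) : Int :=
  let freq := pvCounterAdd (PySem.Dict.counter a.toList) (PySem.Dict.counter b.toList)
  -- max() of an empty sequence raises ValueError in Python (only when a = b = ""): excluded by Pre_
  let best : Int :=
    match PySem.List.max? freq.values id with
    | some v => PySem.Str.len a + PySem.Str.len b - v
    | none => 0
  (PySem.List.pyRange 0 25 1).foldl (pvStepB a b) best

-- ===== PRECONDITION & SPEC =====
-- Pre_ excludes only a = b = "", where Python's max() of an empty sequence raises ValueError (in A and in B alike).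
def Pre_minCharacters (a : String) (b : String) : Prop := ¬ (a = "" ∧ b = "")
instance (a : String) (b : String) : Decidable (Pre_minCharacters a b) := by unfold Pre_minCharacters; infer_instance
def pvWitness_minCharacters : String × String := ("ab", "c")

def Spec_minCharacters (a : String) (b : String) (out : Int) : Prop := out = minCharacters_alt a b
instance (a : String) (b : String) (out : Int) : Decidable (Spec_minCharacters a b out) := by unfold Spec_minCharacters; infer_instance

-- ===== CLAIM (what is proved, stated in full; the proofs are below) =====
def Claim_equal_minCharacters : Prop := ∀ (a : String) (b : String), Dom_minCharacters a b → Pre_minCharacters a b → Spec_minCharacters a b (minCharacters a b)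

-- ===== LEMMAS AND PROOFS =====

-- dict with every key pushed through f (used to relate A's index-keyed counters to B's char-keyed ones)
def pvMapKeys {κ κ' ν : Type} (f : κ → κ') (d : PySem.Dict κ ν) : PySem.Dict κ' ν :=
  PySem.Dict.mk (d.items.map (fun p => (f p.1, p.2)))

theorem pvBeqMap {κ κ' : Type} [BEq κ] [LawfulBEq κ] [BEq κ'] [LawfulBEq κ']
    {f : κ → κ'} (hf : Function.Injective f) (x y : κ) : (f x == f y) = (x == y) := by
  by_cases h : x = y
  · subst h; simp
  · have h2 : f x ≠ f y := fun hc => h (hf hc)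
    simp [h, h2]

theorem pvMapKeys_contains {κ κ' ν : Type} [BEq κ] [LawfulBEq κ] [BEq κ'] [LawfulBEq κ']
    {f : κ → κ'} (hf : Function.Injective f) (d : PySem.Dict κ ν) (k : κ) :
    (pvMapKeys f d).contains (f k) = d.contains k := by
  simp only [pvMapKeys, PySem.Dict.contains, List.any_map]
  congr 1
  funext p
  simp only [Function.comp]
  exact pvBeqMap hf p.1 k

theorem pvMapKeys_get? {κ κ' ν : Type} [BEq κ] [LawfulBEq κ] [BEq κ'] [LawfulBEq κ']
    {f : κ → κ'} (hf : Function.Injective f) (d : PySem.Dict κ ν) (k : κ) :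
    (pvMapKeys f d).get? (f k) = d.get? k := by
  simp only [pvMapKeys, PySem.Dict.get?, List.find?_map]
  have hp : ((fun p : κ' × ν => p.1 == f k) ∘ (fun p : κ × ν => (f p.1, p.2)))
      = fun p : κ × ν => p.1 == k := by
    funext p
    simp only [Function.comp]
    exact pvBeqMap hf p.1 k
  rw [hp]
  cases h : List.find? (fun p : κ × ν => p.1 == k) d.items <;> simp [h]

theorem pvMapKeys_getD {κ κ' ν : Type} [BEq κ] [LawfulBEq κ] [BEq κ'] [LawfulBEq κ']
    {f : κ → κ'} (hf : Function.Injective f) (d : PySem.Dict κ ν) (k : κ) (v : ν) :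
    (pvMapKeys f d).getD (f k) v = d.getD k v := by
  simp only [PySem.Dict.getD, pvMapKeys_get? hf]

theorem pvMapKeys_insert {κ κ' ν : Type} [BEq κ] [LawfulBEq κ] [BEq κ'] [LawfulBEq κ']
    {f : κ → κ'} (hf : Function.Injective f) (d : PySem.Dict κ ν) (k : κ) (v : ν) :
    pvMapKeys f (d.insert k v) = (pvMapKeys f d).insert (f k) v := by
  apply PySem.Dict.ext
  have hc' := pvMapKeys_contains hf d k
  have hitems : (pvMapKeys f d).items = d.items.map (fun p => (f p.1, p.2)) := rfl
  have hl : (pvMapKeys f (d.insert k v)).items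
      = ((d.insert k v).items).map (fun p => (f p.1, p.2)) := rfl
  rw [hl, PySem.Dict.items_insert, PySem.Dict.items_insert, hc', hitems]
  by_cases hcon : d.contains k = true
  · rw [if_pos hcon, if_pos hcon, List.map_map, List.map_map]
    apply List.map_congr_left
    intro p _
    by_cases hpk : (p.1 == k) = true
    · simp [Function.comp, hpk, pvBeqMap hf p.1 k]
    · simp [Function.comp, hpk, pvBeqMap hf p.1 k]
  · rw [if_neg hcon, if_neg hcon, List.map_append]
    rfl

theorem pvMapKeys_modify {κ κ' ν : Type} [BEq κ] [LawfulBEq κ] [BEq κ'] [LawfulBEq κ']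
    {f : κ → κ'} (hf : Function.Injective f) (d : PySem.Dict κ ν) (k : κ) (d0 : ν) (g : ν → ν) :
    pvMapKeys f (d.modify k d0 g) = (pvMapKeys f d).modify (f k) d0 g := by
  simp only [PySem.Dict.modify, pvMapKeys_insert hf, pvMapKeys_getD hf]

theorem pvMapKeys_empty {κ κ' ν : Type} (f : κ → κ') :
    pvMapKeys (ν := ν) f PySem.Dict.empty = PySem.Dict.empty := rfl

theorem pvCounter_map {κ κ' : Type} [BEq κ] [LawfulBEq κ] [BEq κ'] [LawfulBEq κ']
    {f : κ → κ'} (hf : Function.Injective f) (l : List κ) :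
    PySem.Dict.counter (l.map f) = pvMapKeys f (PySem.Dict.counter l) := by
  have h : ∀ d : PySem.Dict κ Int,
      (l.map f).foldl (fun d x => d.modify x 0 (· + 1)) (pvMapKeys f d)
        = pvMapKeys f (l.foldl (fun d x => d.modify x 0 (· + 1)) d) := by
    induction l with
    | nil => intro d; rfl
    | cons x xs ih =>
      intro d
      simp only [List.map_cons, List.foldl_cons]
      rw [← pvMapKeys_modify hf]
      exact ih _
  have h2 := h PySem.Dict.empty
  rw [pvMapKeys_empty] at h2
  exact h2

theorem pvCounterAdd_map {κ κ' : Type} [BEq κ] [LawfulBEq κ] [BEq κ'] [LawfulBEq κ']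
    {f : κ → κ'} (hf : Function.Injective f) (d1 d2 : PySem.Dict κ Int) :
    pvCounterAdd (pvMapKeys f d1) (pvMapKeys f d2) = pvMapKeys f (pvCounterAdd d1 d2) := by
  have h1 : ∀ (l : List (κ × Int)) (r : PySem.Dict κ Int),
      (l.map (fun p => (f p.1, p.2))).foldl
          (fun r p => if 0 < p.2 + (pvMapKeys f d2).getD p.1 0
            then r.insert p.1 (p.2 + (pvMapKeys f d2).getD p.1 0) else r) (pvMapKeys f r)
        = pvMapKeys f (l.foldl
          (fun r p => if 0 < p.2 + d2.getD p.1 0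
            then r.insert p.1 (p.2 + d2.getD p.1 0) else r) r) := by
    intro l
    induction l with
    | nil => intro r; rfl
    | cons p ps ih =>
      intro r
      simp only [List.map_cons, List.foldl_cons, pvMapKeys_getD hf]
      by_cases hp : 0 < p.2 + d2.getD p.1 0
      · simp only [hp, if_true]
        rw [← pvMapKeys_insert hf]
        exact ih _
      · simp only [hp, if_false]
        exact ih _
  have h2 : ∀ (l : List (κ × Int)) (r : PySem.Dict κ Int),
      (l.map (fun p => (f p.1, p.2))).foldl
          (fun r p => if (pvMapKeys f d1).contains p.1 = false ∧ 0 < p.2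
            then r.insert p.1 p.2 else r) (pvMapKeys f r)
        = pvMapKeys f (l.foldl
          (fun r p => if d1.contains p.1 = false ∧ 0 < p.2 then r.insert p.1 p.2 else r) r) := by
    intro l
    induction l with
    | nil => intro r; rfl
    | cons p ps ih =>
      intro r
      simp only [List.map_cons, List.foldl_cons, pvMapKeys_contains hf]
      by_cases hp : d1.contains p.1 = false ∧ 0 < p.2
      · simp only [hp, if_true]
        rw [← pvMapKeys_insert hf]
        exact ih _
      · simp only [hp, if_false]
        exact ih _
  have hi1 : (pvMapKeys f d1).items = d1.items.map (fun p => (f p.1, p.2)) := rfl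
  have hi2 : (pvMapKeys f d2).items = d2.items.map (fun p => (f p.1, p.2)) := rfl
  simp only [pvCounterAdd]
  rw [hi1, hi2]
  have e1 := h1 d1.items PySem.Dict.empty
  rw [pvMapKeys_empty] at e1
  rw [e1]
  have e2 := h2 d2.items (d1.items.foldl
    (fun r p => if 0 < p.2 + d2.getD p.1 0 then r.insert p.1 (p.2 + d2.getD p.1 0) else r)
    PySem.Dict.empty)
  rw [e2]

theorem pvMapKeys_values {κ κ' ν : Type} (f : κ → κ') (d : PySem.Dict κ ν) :
    (pvMapKeys f d).values = d.values := by
  simp [pvMapKeys, PySem.Dict.values, List.map_map, Function.comp]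

theorem pvValuesEq {κ κ' : Type} [BEq κ] [LawfulBEq κ] [BEq κ'] [LawfulBEq κ']
    {f : κ → κ'} (hf : Function.Injective f) (l1 l2 : List κ) :
    (pvCounterAdd (PySem.Dict.counter (l1.map f)) (PySem.Dict.counter (l2.map f))).values
      = (pvCounterAdd (PySem.Dict.counter l1) (PySem.Dict.counter l2)).values := by
  rw [pvCounter_map hf, pvCounter_map hf, pvCounterAdd_map hf, pvMapKeys_values]

theorem pvIdx_inj : Function.Injective pvIdx := by
  intro c c' h
  have h2 : c.toNat = c'.toNat := by unfold pvIdx at h; omega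
  have h3 : c.val = c'.val := by
    apply UInt32.toNat_inj.mp
    exact h2
  exact Char.ext h3

-- number of elements of l lying in [0, j]
def pvPfx (l : List Int) (j : Int) : Int := (l.countP (fun x => decide (0 ≤ x ∧ x ≤ j)) : Int)

theorem pvCountP_zero (l : List Int) :
    l.countP (fun x => decide (0 ≤ x ∧ x ≤ 0)) = l.count 0 := by
  induction l with
  | nil => rfl
  | cons x xs ih =>
    rw [List.countP_cons, List.count_cons, ih]
    congr 1
    by_cases hx : x = 0
    · subst hx; simp
    · have h1 : ¬ (0 ≤ x ∧ x ≤ 0) := by omega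
      simp [hx, h1]

theorem pvPfx_zero (l : List Int) : pvPfx l 0 = (l.count 0 : Int) := by
  unfold pvPfx
  rw [pvCountP_zero]

theorem pvCountP_succ (l : List Int) (t : Int) (ht : 0 ≤ t) :
    l.countP (fun x => decide (0 ≤ x ∧ x ≤ t + 1))
      = l.count (t + 1) + l.countP (fun x => decide (0 ≤ x ∧ x ≤ t)) := by
  induction l with
  | nil => rfl
  | cons x xs ih =>
    rw [List.countP_cons, List.countP_cons, List.count_cons, ih]
    by_cases hx : x = t + 1
    · have e1 : decide (0 ≤ x ∧ x ≤ t + 1) = true := by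
        apply decide_eq_true; omega
      have e2 : decide (0 ≤ x ∧ x ≤ t) = false := by
        apply decide_eq_false; omega
      have e3 : (x == t + 1) = true := by simp [hx]
      simp only [e1, e2, e3]
      simp only [if_true, Bool.false_eq_true, if_false]
      omega
    · have e1 : decide (0 ≤ x ∧ x ≤ t + 1) = decide (0 ≤ x ∧ x ≤ t) := by
        by_cases h5 : 0 ≤ x ∧ x ≤ t
        · have h6 : 0 ≤ x ∧ x ≤ t + 1 := by omega
          simp [h5, h6]
        · have h6 : ¬ (0 ≤ x ∧ x ≤ t + 1) := by omega
          simp [h5, h6]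
      have e3 : (x == t + 1) = false := by simp [hx]
      simp only [e1, e3]
      simp only [Bool.false_eq_true, if_false]
      omega

theorem pvPfx_succ (l : List Int) (t : Int) (ht : 0 ≤ t) :
    pvPfx l (t + 1) = (l.count (t + 1) : Int) + pvPfx l t := by
  unfold pvPfx
  rw [pvCountP_succ l t ht]
  push_cast
  ring

-- the value counter k holds at key j after t iterations of A's loop
def pvF (l : List Int) (t : Nat) (j : Int) : Int :=
  if 0 ≤ j ∧ j ≤ (t : Int) then pvPfx l j else (l.count j : Int)

theorem pvF_zero (l : List Int) (j : Int) : pvF l 0 j = (l.count j : Int) := by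
  unfold pvF
  by_cases h : 0 ≤ j ∧ j ≤ ((0 : Nat) : Int)
  · have hj : j = 0 := by push_cast at h; omega
    subst hj
    rw [if_pos h, pvPfx_zero]
  · rw [if_neg h]

theorem pvF_succ_ne (l : List Int) (t : Nat) (j : Int) (hj : j ≠ (t : Int) + 1) :
    pvF l (t + 1) j = pvF l t j := by
  unfold pvF
  have h : (0 ≤ j ∧ j ≤ ((t + 1 : Nat) : Int)) ↔ (0 ≤ j ∧ j ≤ (t : Int)) := by
    push_cast
    omega
  rw [if_congr h rfl rfl]

theorem pvLoop (m n : Int) (l1 l2 : List Int) (t : Nat) (ans : Int) :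
    ((PySem.List.pyRange 0 (t : Int) 1).foldl (pvStepA m n)
        (ans, PySem.Dict.counter l1, PySem.Dict.counter l2)).1
      = (PySem.List.pyRange 0 (t : Int) 1).foldl
          (fun best i => min (min best (m - pvPfx l1 i + pvPfx l2 i)) (n - pvPfx l2 i + pvPfx l1 i)) ans
    ∧ (∀ j : Int, ((PySem.List.pyRange 0 (t : Int) 1).foldl (pvStepA m n)
        (ans, PySem.Dict.counter l1, PySem.Dict.counter l2)).2.1.getD j 0 = pvF l1 t j)
    ∧ (∀ j : Int, ((PySem.List.pyRange 0 (t : Int) 1).foldl (pvStepA m n)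
        (ans, PySem.Dict.counter l1, PySem.Dict.counter l2)).2.2.getD j 0 = pvF l2 t j) := by
  induction t generalizing ans with
  | zero =>
    have h0 : ((0 : Nat) : Int) = 0 := by norm_num
    rw [h0, PySem.List.pyRange_one_eq_nil le_rfl]
    simp only [List.foldl_nil]
    refine ⟨by simp, ?_, ?_⟩
    · intro j
      rw [PySem.Dict.getD_counter, pvF_zero]
    · intro j
      rw [PySem.Dict.getD_counter, pvF_zero]
  | succ t ih =>
    have hcast : ((t + 1 : Nat) : Int) = (t : Int) + 1 := by push_cast; ring
    have hnn : (0 : Int) ≤ (t : Int) := by omega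
    rw [hcast, PySem.List.pyRange_one_succ_right hnn]
    obtain ⟨ha, hd1, hd2⟩ := ih ans
    simp only [List.foldl_append, List.foldl_cons, List.foldl_nil]
    set r := (PySem.List.pyRange 0 (t : Int) 1).foldl (pvStepA m n)
      (ans, PySem.Dict.counter l1, PySem.Dict.counter l2) with hr
    have hg1a : r.2.1.getD ((t : Int) + 1) 0 = (l1.count ((t : Int) + 1) : Int) := by
      rw [hd1]
      unfold pvF
      rw [if_neg (by omega)]
    have hg1b : r.2.1.getD (t : Int) 0 = pvPfx l1 (t : Int) := by
      rw [hd1]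
      unfold pvF
      rw [if_pos ⟨by omega, le_rfl⟩]
    have hg2a : r.2.2.getD ((t : Int) + 1) 0 = (l2.count ((t : Int) + 1) : Int) := by
      rw [hd2]
      unfold pvF
      rw [if_neg (by omega)]
    have hg2b : r.2.2.getD (t : Int) 0 = pvPfx l2 (t : Int) := by
      rw [hd2]
      unfold pvF
      rw [if_pos ⟨by omega, le_rfl⟩]
    have hne : ((t : Int)) ≠ (t : Int) + 1 := by omega
    simp only [pvStepA]
    refine ⟨?_, ?_, ?_⟩
    · rw [PySem.Dict.getD_insert, PySem.Dict.getD_insert, if_neg hne, if_neg hne, hg1b, hg2b, ha]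
    · intro j
      simp only [PySem.Dict.getD_insert]
      by_cases hj : j = (t : Int) + 1
      · subst hj
        rw [if_pos rfl, hg1a, hg1b, ← pvPfx_succ l1 (t : Int) hnn]
        unfold pvF
        rw [if_pos ⟨by omega, by push_cast; omega⟩]
      · rw [if_neg hj, hd1 j, pvF_succ_ne l1 t j hj]
    · intro j
      simp only [PySem.Dict.getD_insert]
      by_cases hj : j = (t : Int) + 1
      · subst hj
        rw [if_pos rfl, hg2a, hg2b, ← pvPfx_succ l2 (t : Int) hnn]
        unfold pvF
        rw [if_pos ⟨by omega, by push_cast; omega⟩]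
      · rw [if_neg hj, hd2 j, pvF_succ_ne l2 t j hj]

theorem pvStepB_eq (a b : String) (best i : Int) :
    pvStepB a b best i
      = min (min best (PySem.Str.len a - pvPfx (a.toList.map pvIdx) i + pvPfx (b.toList.map pvIdx) i))
          (PySem.Str.len b - pvPfx (b.toList.map pvIdx) i + pvPfx (a.toList.map pvIdx) i) := by
  unfold pvStepB pvPfx
  have hca : ∀ (l : List Char),
      l.countP (fun c => decide (0 ≤ pvIdx c ∧ pvIdx c ≤ i))
        = (l.map pvIdx).countP (fun x => decide (0 ≤ x ∧ x ≤ i)) := by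
    intro l
    rw [List.countP_map]
    rfl
  simp only [PySem.List.foldl_ite_add_one, zero_add, hca]

theorem pvMain (a b : String) : minCharacters a b = minCharacters_alt a b := by
  simp only [minCharacters, minCharacters_alt]
  rw [pvValuesEq pvIdx_inj]
  generalize (match PySem.List.max?
      (pvCounterAdd (PySem.Dict.counter a.toList) (PySem.Dict.counter b.toList)).values id with
    | some v => PySem.Str.len a + PySem.Str.len b - v
    | none => (0 : Int)) = ans0
  have h25 : (25 : Int) = ((25 : Nat) : Int) := by norm_num
  rw [h25]
  rw [(pvLoop (PySem.Str.len a) (PySem.Str.len b) (a.toList.map pvIdx) (b.toList.map pvIdx) 25 ans0).1]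
  have hfun : pvStepB a b = fun best i =>
      min (min best (PySem.Str.len a - pvPfx (a.toList.map pvIdx) i + pvPfx (b.toList.map pvIdx) i))
        (PySem.Str.len b - pvPfx (b.toList.map pvIdx) i + pvPfx (a.toList.map pvIdx) i) := by
    funext best i
    exact pvStepB_eq a b best i
  rw [hfun]

-- ===== VERDICT (by name: the statement is the Claim_ definition above) =====
theorem minCharacters_spec : Claim_equal_minCharacters := by
  intro a b _hd _hp
  unfold Spec_minCharacters
  exact pvMain a b
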